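-- pv_equiv track=rewrite | github.com/gboicheff/LispInterpreter | lisp_interpreter.py | l_and
-- ===== SOURCE A (Python) =====
-- def l_and(args):
--     result = True
--     for arg in args:
--         if not isinstance(arg, bool):
--             raise Exception("All args must be boolean")
--         else:
--             result = result and arg
--     return result
-- ===== SOURCE B (Python) =====
-- def l_and(args):
--     for arg in args:
--         if not isinstance(arg, bool):
--             raise Exception("All args must be boolean")
--     return all(args)
-- ===== Notes on version B (the rewrite author's own statement) =====
-- stated objective: idiomatic
-- what changed: A's single loop that both validates and accumulates result &= arg is split into a pure validation pass followed by the built-in all(), delegating the conjunction to the standard library.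
import Mathlib
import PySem

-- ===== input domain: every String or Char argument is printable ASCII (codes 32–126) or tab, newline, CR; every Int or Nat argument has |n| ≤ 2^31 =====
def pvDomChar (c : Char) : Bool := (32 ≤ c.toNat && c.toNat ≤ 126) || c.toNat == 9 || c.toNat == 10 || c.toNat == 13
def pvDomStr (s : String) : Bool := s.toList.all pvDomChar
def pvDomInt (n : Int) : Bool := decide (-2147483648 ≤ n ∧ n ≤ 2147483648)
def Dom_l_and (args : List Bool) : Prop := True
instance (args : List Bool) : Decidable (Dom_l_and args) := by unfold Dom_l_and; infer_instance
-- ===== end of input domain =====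

-- B replaces A's combined validate-and-accumulate loop by a validation pass plus all(); idiomatic, same cost.

-- ===== PORT A =====
-- A: result = True; for arg in args: (isinstance check never fires on Bool) result = result and arg
def l_and (args : List Bool) : Bool :=
  args.foldl (fun result arg => result && arg) true

-- ===== PORT B =====
-- B: validation pass (vacuous on List Bool, kept step for step), then all(args)
def l_and_validate (args : List Bool) : Unit :=
  match args with
  | [] => ()
  | _ :: rest => l_and_validate rest

def l_and_alt (args : List Bool) : Bool :=
  match l_and_validate args with
  | () => args.all (fun b => b)

-- ===== PRECONDITION & SPEC =====
def Spec_l_and (args : List Bool) (out : Bool) : Prop := out = l_and_alt args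
instance (args : List Bool) (out : Bool) : Decidable (Spec_l_and args out) := by unfold Spec_l_and; infer_instance

-- ===== CLAIM (what is proved, stated in full; the proofs are below) =====
def Claim_equal_l_and : Prop := ∀ (args : List Bool), Dom_l_and args → Spec_l_and args (l_and args)

-- ===== LEMMAS AND PROOFS =====
theorem l_and_foldl_acc (args : List Bool) (r : Bool) :
    args.foldl (fun result arg => result && arg) r = (r && args.all (fun b => b)) := by
  induction args generalizing r with
  | nil => simp [List.foldl, List.all]
  | cons a t ih => simp [List.foldl, List.all, ih, Bool.and_assoc]

-- ===== VERDICT (by name: the statement is the Claim_ definition above) =====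
theorem l_and_spec : Claim_equal_l_and := by
  intro args _
  unfold Spec_l_and l_and l_and_alt
  simp [l_and_foldl_acc]
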